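-- pv_equiv track=rewrite | github.com/S-Samoylov/diploma | Kirichenko/find_where_all_4/kir_one_shadow_performed_for_some_shadows.py | findZhegalkin
-- ===== SOURCE A (Python) =====
-- import math
--
-- def findZhegalkin(inputVec):
--     n = int(math.log2(len(inputVec)))
--     zhigalkin = inputVec.copy()
--     # calculate zhigalkin
--     for i in range(n):
--         gap = 2 ** i
--         j = gap
--         while j < len(zhigalkin):
--             for l in range(gap):
--                 zhigalkin[j] = (zhigalkin[j] + zhigalkin[j - gap]) % 2
--                 j += 1
--             j += gap
--     return zhigalkin
-- ===== SOURCE B (Python) =====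
-- import math
--
-- def subsetSum(vec, high, low):
--     if low == 0:
--         return vec[high]
--     b = 1 << (low.bit_length() - 1)
--     rest = low - b
--     return subsetSum(vec, high, rest) + subsetSum(vec, high + b, rest)
--
-- def findZhegalkin(inputVec):
--     n = int(math.log2(len(inputVec)))
--     result = []
--     for j in range(len(inputVec)):
--         low = j % (1 << n)
--         if low == 0:
--             result.append(inputVec[j])
--         else:
--             result.append(subsetSum(inputVec, j - low, low) % 2)
--     return result
-- ===== Notes on version B (the rewrite author's own statement) =====
-- stated objective: alternative
-- what changed: Replaces the in-place level-by-level butterfly (XOR each index with its partner gap below, per bit level) by a direct per-index computation of the Moebius/ANF transform: for each index j it recursively sums inputVec over all subsets of the low n bits of j and reduces mod 2 once, building a fresh output list.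
import Mathlib
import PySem

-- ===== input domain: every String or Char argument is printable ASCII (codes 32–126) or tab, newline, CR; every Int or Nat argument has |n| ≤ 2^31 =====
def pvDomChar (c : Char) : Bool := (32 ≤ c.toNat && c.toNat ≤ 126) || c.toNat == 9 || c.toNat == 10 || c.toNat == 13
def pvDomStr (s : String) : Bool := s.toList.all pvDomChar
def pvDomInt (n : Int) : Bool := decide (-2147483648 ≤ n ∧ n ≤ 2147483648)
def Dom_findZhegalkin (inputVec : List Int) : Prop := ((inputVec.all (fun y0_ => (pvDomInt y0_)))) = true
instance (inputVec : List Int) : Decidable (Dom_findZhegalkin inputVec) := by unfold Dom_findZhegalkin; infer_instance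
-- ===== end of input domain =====

-- B replaces A's in-place level-by-level GF(2) butterfly by a direct per-index
-- Moebius/ANF subset-sum (alternative decomposition; not claimed faster).

-- ===== PORT A =====
-- inner 'for l in range(gap)' loop; returns (list, j)
def innerForA (gap : Nat) : Nat → Nat → List Int → List Int × Nat
  | 0, j, z => (z, j)
  | l+1, j, z =>
      innerForA gap l (j+1) (z.set j (PySem.Int.mod (z.getD j 0 + z.getD (j - gap) 0) 2))

-- 'while j < len(zhigalkin)' loop; fuel only makes it total (the loop exits by itself)
def whileA (gap : Nat) : Nat → Nat → List Int → List Int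
  | 0, _, z => z
  | fuel+1, j, z =>
      if j < z.length then
        let p := innerForA gap gap j z
        whileA gap fuel (p.2 + gap) p.1
      else z

def findZhegalkin (inputVec : List Int) : List Int :=
  (List.range (Nat.log2 inputVec.length)).foldl
    (fun z i => whileA (2 ^ i) z.length (2 ^ i) z) inputVec

-- ===== PORT B =====
-- sum of vec[high + s] over all submasks s of low (recursion on the top bit of low)
-- fuel = low only makes the recursion structural; the branch condition exits first
def subsetGo (vec : List Int) : Nat → Nat → Nat → Int
  | high, _, 0 => vec.getD high 0
  | high, low, fuel+1 =>
      if low = 0 then vec.getD high 0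
      else
        let b := 2 ^ Nat.log2 low
        subsetGo vec high (low - b) fuel + subsetGo vec (high + b) (low - b) fuel

def subsetSumB (vec : List Int) (high low : Nat) : Int := subsetGo vec high low low

def findZhegalkin_alt (inputVec : List Int) : List Int :=
  (List.range inputVec.length).map (fun j =>
    let low := j % 2 ^ Nat.log2 inputVec.length
    if low = 0 then inputVec.getD j 0
    else PySem.Int.mod (subsetSumB inputVec (j - low) low) 2)

-- ===== PRECONDITION & SPEC =====
-- A raises ValueError on the empty list (log2 of 0) and IndexError when some level's last block
-- overruns the list; Pre_ admits exactly the inputs on which the Python A returns.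
def Pre_findZhegalkin (inputVec : List Int) : Prop :=
  inputVec ≠ [] ∧
  ∀ i < Nat.log2 inputVec.length, inputVec.length % 2 ^ (i+1) ≤ 2 ^ i

instance (inputVec : List Int) : Decidable (Pre_findZhegalkin inputVec) := by
  unfold Pre_findZhegalkin; infer_instance

def pvWitness_findZhegalkin : List Int := [1, 0, 1, 1]

def Spec_findZhegalkin (inputVec : List Int) (out : List Int) : Prop := out = findZhegalkin_alt inputVec
instance (inputVec : List Int) (out : List Int) : Decidable (Spec_findZhegalkin inputVec out) := by unfold Spec_findZhegalkin; infer_instance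

-- ===== CLAIM (what is proved, stated in full; the proofs are below) =====
def Claim_equal_findZhegalkin : Prop := ∀ (inputVec : List Int), Dom_findZhegalkin inputVec → Pre_findZhegalkin inputVec → Spec_findZhegalkin inputVec (findZhegalkin inputVec)

-- ===== LEMMAS AND PROOFS =====

-- the value entry p holds after butterfly levels 0..n-1 (the per-index subset sum)
def phiZ (v : List Int) (n p : Nat) : Int :=
  if p % 2 ^ n = 0 then v.getD p 0
  else PySem.Int.mod (subsetSumB v (p - p % 2 ^ n) (p % 2 ^ n)) 2

theorem getD_set_self (z : List Int) (j : Nat) (v : Int) (h : j < z.length) :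
    (z.set j v).getD j 0 = v := by
  simp [List.getD_eq_getElem?_getD, h]

theorem getD_set_ne (z : List Int) (j q : Nat) (v : Int) (h : q ≠ j) :
    (z.set j v).getD q 0 = z.getD q 0 := by
  simp [List.getD_eq_getElem?_getD, List.getElem?_set_ne (by omega : j ≠ q)]

theorem innerForA_snd (gap : Nat) : ∀ l j z, (innerForA gap l j z).2 = j + l := by
  intro l
  induction l with
  | zero => intro j z; simp [innerForA]
  | succ l ih => intro j z; simp [innerForA, ih]; omega

theorem innerForA_length (gap : Nat) : ∀ l j z, (innerForA gap l j z).1.length = z.length := by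
  intro l
  induction l with
  | zero => intro j z; simp [innerForA]
  | succ l ih => intro j z; simp [innerForA, ih]

theorem innerForA_getD (gap : Nat) : ∀ l j z, gap ≤ j → l ≤ gap → j + l ≤ z.length →
    ∀ p, (innerForA gap l j z).1.getD p 0 =
      if j ≤ p ∧ p < j + l then PySem.Int.mod (z.getD p 0 + z.getD (p - gap) 0) 2
      else z.getD p 0 := by
  intro l
  induction l with
  | zero =>
    intro j z _ _ _ p
    simp only [innerForA]
    rw [if_neg (by omega : ¬ (j ≤ p ∧ p < j + 0))]
  | succ l ih =>
    intro j z hgj hl hlen p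
    simp only [innerForA]
    set z' := z.set j (PySem.Int.mod (z.getD j 0 + z.getD (j - gap) 0) 2) with hz'
    have hlen' : z'.length = z.length := by simp [hz']
    rw [ih (j+1) z' (by omega) (by omega) (by omega) p]
    by_cases hpj : p = j
    · subst hpj
      have h1 : ¬ (p + 1 ≤ p ∧ p < p + 1 + l) := by omega
      have h2 : p ≤ p ∧ p < p + (l+1) := by omega
      simp only [if_neg h1, if_pos h2, hz']
      exact getD_set_self z p _ (by omega)
    · have e1 : z'.getD p 0 = z.getD p 0 := getD_set_ne z j p _ hpj
      by_cases hin : j + 1 ≤ p ∧ p < j + 1 + l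
      · have e2 : z'.getD (p - gap) 0 = z.getD (p - gap) 0 :=
          getD_set_ne z j (p - gap) _ (by omega)
        have h2 : j ≤ p ∧ p < j + (l+1) := by omega
        rw [if_pos hin, if_pos h2, e1, e2]
      · have h2 : ¬ (j ≤ p ∧ p < j + (l+1)) := by omega
        rw [if_neg hin, if_neg h2, e1]

theorem whileA_length (gap : Nat) : ∀ fuel j z, (whileA gap fuel j z).length = z.length := by
  intro fuel
  induction fuel with
  | zero => intro j z; simp [whileA]
  | succ fuel ih => intro j z; simp only [whileA]; split <;> simp [ih, innerForA_length]

theorem mod_decomp (m q r : Nat) (hr : r < m) : (m * q + r) % m = r := by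
  rw [Nat.mul_add_mod]; exact Nat.mod_eq_of_lt hr

theorem block_fits (gap j L : Nat) (hj : j % (2*gap) = gap)
    (hL : L % (2*gap) ≤ gap) (hlt : j < L) : j + gap ≤ L := by
  by_contra h
  have hq := Nat.div_add_mod j (2*gap)
  have hdecomp : L = 2*gap * (j / (2*gap)) + (gap + (L - j)) := by omega
  rw [hdecomp, mod_decomp _ _ _ (by omega)] at hL
  omega

theorem whileA_getD (gap : Nat) (hgap : 0 < gap) :
    ∀ fuel j z, j % (2*gap) = gap → z.length ≤ j + fuel → z.length % (2*gap) ≤ gap →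
    ∀ p, (whileA gap fuel j z).getD p 0 =
      if j ≤ p ∧ p < z.length ∧ gap ≤ p % (2*gap) then
        PySem.Int.mod (z.getD p 0 + z.getD (p - gap) 0) 2
      else z.getD p 0 := by
  intro fuel
  induction fuel with
  | zero =>
    intro j z hj hfuel hL p
    have : ¬ (j ≤ p ∧ p < z.length ∧ gap ≤ p % (2*gap)) := by omega
    simp [whileA, this]
  | succ fuel ih =>
    intro j z hj hfuel hL p
    simp only [whileA]
    split
    case isFalse hjL =>
      have : ¬ (j ≤ p ∧ p < z.length ∧ gap ≤ p % (2*gap)) := by omega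
      rw [if_neg this]
    case isTrue hjL =>
      have hfit : j + gap ≤ z.length := block_fits gap j z.length hj hL hjL
      have hgj : gap ≤ j := hj ▸ Nat.mod_le j (2*gap)
      have hq := Nat.div_add_mod j (2*gap)
      set z' := (innerForA gap gap j z).1 with hz'
      have hlen' : z'.length = z.length := innerForA_length gap gap j z
      have hinner := innerForA_getD gap gap j z hgj le_rfl hfit
      rw [innerForA_snd gap gap j z]
      have hj' : (j + gap + gap) % (2*gap) = gap := by
        have h2 : j + gap + gap = j + 2*gap := by omega
        rw [h2, Nat.add_mod_right, hj]
      rw [ih (j + gap + gap) z' hj' (by omega) (by rw [hlen']; exact hL) p]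
      by_cases hcase : j + 2*gap ≤ p
      · have e1 : z'.getD p 0 = z.getD p 0 := by
          rw [hinner p, if_neg (by omega)]
        have e2 : z'.getD (p - gap) 0 = z.getD (p - gap) 0 := by
          rw [hinner (p - gap), if_neg (by omega)]
        have hcond : (j + gap + gap ≤ p ∧ p < z'.length ∧ gap ≤ p % (2*gap)) ↔
            (j ≤ p ∧ p < z.length ∧ gap ≤ p % (2*gap)) := by
          rw [hlen']; constructor <;> intro h <;> exact ⟨by omega, h.2⟩
        by_cases hc : j + gap + gap ≤ p ∧ p < z'.length ∧ gap ≤ p % (2*gap)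
        · rw [if_pos hc, if_pos (hcond.mp hc), e1, e2]
        · rw [if_neg hc, if_neg (fun h => hc (hcond.mpr h)), e1]
      · rw [if_neg (by omega), hinner p]
        by_cases hwin : j ≤ p ∧ p < j + gap
        · have hpm : p % (2*gap) = gap + (p - j) := by
            have hdecomp : p = 2*gap * (j / (2*gap)) + (gap + (p - j)) := by omega
            conv_lhs => rw [hdecomp]
            exact mod_decomp _ _ _ (by omega)
          rw [if_pos hwin, if_pos ⟨by omega, by omega, by omega⟩]
        · rw [if_neg hwin]
          by_cases hlow : j ≤ p
          · have hpm : p % (2*gap) = p - j - gap := by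
              have hf : 2*gap * (j / (2*gap) + 1) = 2*gap * (j / (2*gap)) + 2*gap := by ring
              have hdecomp : p = 2*gap * (j / (2*gap) + 1) + (p - j - gap) := by omega
              conv_lhs => rw [hdecomp]
              exact mod_decomp _ _ _ (by omega)
            rw [if_neg (by omega)]
          · rw [if_neg (by omega)]

theorem log2_of_window (i x : Nat) (h1 : 2^i ≤ x) (h2 : x < 2^(i+1)) : Nat.log2 x = i := by
  rw [Nat.log2_eq_log_two]
  exact Nat.log_eq_of_pow_le_of_lt_pow h1 h2

theorem subsetGo_congr (v : List Int) : ∀ f1 f2 low high, low ≤ f1 → low ≤ f2 →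
    subsetGo v high low f1 = subsetGo v high low f2 := by
  intro f1
  induction f1 with
  | zero =>
    intro f2 low high h1 h2
    have hl : low = 0 := by omega
    subst hl
    cases f2 <;> simp [subsetGo]
  | succ f1 ih =>
    intro f2 low high h1 h2
    cases f2 with
    | zero =>
      have hl : low = 0 := by omega
      subst hl
      simp [subsetGo]
    | succ f2 =>
      simp only [subsetGo]
      by_cases hl : low = 0
      · rw [if_pos hl, if_pos hl]
      · rw [if_neg hl, if_neg hl]
        have hb : 0 < 2 ^ Nat.log2 low := Nat.two_pow_pos _
        rw [ih f2 _ _ (by omega) (by omega), ih f2 _ _ (by omega) (by omega)]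

theorem subsetSumB_zero (v : List Int) (high : Nat) :
    subsetSumB v high 0 = v.getD high 0 := rfl

theorem subsetSumB_split (v : List Int) (high low : Nat) (hl : low ≠ 0) :
    subsetSumB v high low =
      subsetSumB v high (low - 2 ^ Nat.log2 low) +
      subsetSumB v (high + 2 ^ Nat.log2 low) (low - 2 ^ Nat.log2 low) := by
  unfold subsetSumB
  cases low with
  | zero => exact absurd rfl hl
  | succ m =>
    simp only [subsetGo]
    rw [if_neg hl]
    have hb : 0 < 2 ^ Nat.log2 (m+1) := Nat.two_pow_pos _
    rw [subsetGo_congr v m _ _ _ (by omega) (le_refl _),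
        subsetGo_congr v m _ _ _ (by omega) (le_refl _)]

theorem mod2_add_mod2 (a b : Int) :
    PySem.Int.mod (PySem.Int.mod a 2 + PySem.Int.mod b 2) 2 = PySem.Int.mod (b + a) 2 := by
  rw [PySem.Int.mod_eq_emod_of_pos (by norm_num), PySem.Int.mod_eq_emod_of_pos (by norm_num),
      PySem.Int.mod_eq_emod_of_pos (by norm_num), PySem.Int.mod_eq_emod_of_pos (by norm_num)]
  omega

theorem foldl_invariant (v : List Int) (hpre : Pre_findZhegalkin v) :
    ∀ n, n ≤ Nat.log2 v.length →
      ((List.range n).foldl (fun z i => whileA (2 ^ i) z.length (2 ^ i) z) v).length = v.length ∧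
      ∀ p < v.length,
        ((List.range n).foldl (fun z i => whileA (2 ^ i) z.length (2 ^ i) z) v).getD p 0 = phiZ v n p := by
  intro n
  induction n with
  | zero =>
    intro _
    refine ⟨by simp, ?_⟩
    intro p _
    simp [phiZ, Nat.mod_one]
  | succ n ih =>
    intro hn
    obtain ⟨hlen, hptw⟩ := ih (by omega)
    rw [List.range_succ, List.foldl_append]
    set zn := (List.range n).foldl (fun z i => whileA (2 ^ i) z.length (2 ^ i) z) v with hzn
    simp only [List.foldl_cons, List.foldl_nil]
    have hgap0 := Nat.two_pow_pos n
    have hpow : 2 * 2^n = 2^(n+1) := by ring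
    constructor
    · rw [whileA_length, hlen]
    intro p hp
    have hjm : 2^n % (2 * 2^n) = 2^n := Nat.mod_eq_of_lt (by omega)
    have hLm : zn.length % (2 * 2^n) ≤ 2^n := by
      rw [hlen, hpow]
      exact hpre.2 n (by omega)
    rw [whileA_getD (2^n) hgap0 zn.length (2^n) zn hjm (by omega) hLm p]
    have hplen : p < zn.length := by omega
    have hdvd : (2:Nat)^n ∣ 2^(n+1) := pow_dvd_pow 2 (by omega)
    by_cases hbit : 2^n ≤ p % (2 * 2^n)
    · -- bit n of p is set: the entry is updated at this level
      rw [if_pos ⟨le_trans hbit (Nat.mod_le _ _), hplen, hbit⟩]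
      rw [hptw p hp, hptw (p - 2^n) (by omega)]
      rw [hpow] at hbit
      set low' := p % 2^(n+1) with hlow'
      have hlt' : low' < 2^(n+1) := Nat.mod_lt _ (by omega)
      have hple' : low' ≤ p := Nat.mod_le p _
      have f1 : p % 2^n = low' - 2^n := by
        have h1 : p % 2^n = low' % 2^n := by rw [hlow', Nat.mod_mod_of_dvd p hdvd]
        have h2 : low' % 2^n = low' - 2^n := by
          conv_lhs => rw [show low' = 2^n * 1 + (low' - 2^n) by omega]
          exact mod_decomp _ _ _ (by omega)
        rw [h1, h2]
      have f2 : (p - 2^n) % 2^n = low' - 2^n := by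
        have h3 : p % 2^n = (p - 2^n) % 2^n := by
          conv_lhs => rw [show p = 2^n + (p - 2^n) by omega]
          exact Nat.add_mod_left _ _
        rw [← h3]
        exact f1
      simp only [phiZ, f1, f2]
      rw [if_neg (show ¬ low' = 0 by omega)]
      have hlog : Nat.log2 low' = n := log2_of_window n low' hbit hlt'
      have hsplit := subsetSumB_split v (p - low') low' (by omega)
      rw [hlog] at hsplit
      by_cases hl0 : low' - 2^n = 0
      · rw [if_pos hl0, if_pos hl0, hsplit, hl0, subsetSumB_zero, subsetSumB_zero]
        rw [show p - low' + 2^n = p by omega, show p - low' = p - 2^n by omega]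
        rw [Int.add_comm]
      · rw [if_neg hl0, if_neg hl0, hsplit, mod2_add_mod2]
        rw [show p - 2^n - (low' - 2^n) = p - low' by omega,
            show p - (low' - 2^n) = p - low' + 2^n by omega]
    · -- bit n of p is clear: the entry is untouched and phiZ is unchanged
      rw [if_neg (by intro h; exact hbit h.2.2), hptw p hp]
      rw [hpow] at hbit
      have h1 : p % 2^n = (p % 2^(n+1)) % 2^n := (Nat.mod_mod_of_dvd p hdvd).symm
      have h2 : (p % 2^(n+1)) % 2^n = p % 2^(n+1) := Nat.mod_eq_of_lt (by omega)
      have hlow : p % 2^(n+1) = p % 2^n := by omega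
      simp only [phiZ, hlow]

-- ===== VERDICT (by name: the statement is the Claim_ definition above) =====
theorem findZhegalkin_spec : Claim_equal_findZhegalkin := by
  intro v _ hpre
  unfold Spec_findZhegalkin findZhegalkin findZhegalkin_alt
  obtain ⟨hlen, hptw⟩ := foldl_invariant v hpre (Nat.log2 v.length) le_rfl
  apply List.ext_getElem (by simpa using hlen)
  intro i h1 h2
  have hi : i < v.length := by rwa [hlen] at h1
  have hgd := hptw i hi
  rw [List.getD_eq_getElem _ _ h1] at hgd
  rw [hgd]
  simp only [List.getElem_map, List.getElem_range]
  rfl
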